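-- pv_equiv track=rewrite | github.com/mte-dgpr/arretify | bench_convertisseur_xml/segmentation_arrete/section_rules.py | reorder_section_levels
-- ===== SOURCE A (Python) =====
-- def reorder_section_levels(patterns, patterns_levels):
--
--     sections_order = ["title", "chapter", "article", "sub_article"]
--
--     # Create mapping of section prefixes to their presence
--     present_sections = {
--         prefix: any(name.startswith(prefix) for name in patterns)
--         for prefix in sections_order
--     }
--
--     # Count missing sections before each position
--     missing_before = {}
--     missing_count = 0
--     for prefix in sections_order:
--         missing_before[prefix] = missing_count
--         if not present_sections[prefix]:
--             missing_count += 1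
--
--     # Assign new levels
--     for name in patterns:
--         # Find which section type this is
--         section_type = next(
--             prefix for prefix in sections_order
--             if name.startswith(prefix)
--         )
--
--         # Get original position and subtract missing sections before it
--         original_position = sections_order.index(section_type)
--         new_level = original_position - missing_before[section_type]
--
--         # Update the patterns_levels dictionary
--         patterns_levels[name] = new_level
--
--     return patterns, patterns_levels
-- ===== SOURCE B (Python) =====
-- def reorder_section_levels(patterns, patterns_levels):
--
--     sections_order = ["title", "chapter", "article", "sub_article"]
--
--     # None of the four prefixes is a prefix of another, so each name matches at
--     # most one; a single pass records every name's section index (and raises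
--     # StopIteration on a name matching none, like the original).
--     indices = [
--         next(j for j, prefix in enumerate(sections_order) if name.startswith(prefix))
--         for name in patterns
--     ]
--     present = set(indices)
--
--     # The compacted level of a section is how many present section indices lie
--     # strictly below its own (an order-independent count over the set).
--     for name, j in zip(patterns, indices):
--         patterns_levels[name] = sum(1 for k in present if k < j)
--
--     return patterns, patterns_levels
-- ===== Notes on version B (the rewrite author's own statement) =====
-- stated objective: alternative
-- what changed: Instead of A's per-prefix presence dict and missing-before prefix-sum (level = original index minus missing count), B does one pass computing each name's section index, collects the set of present indices, and obtains each level as the order-independent count of present indices strictly below the name's own.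
import Mathlib
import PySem

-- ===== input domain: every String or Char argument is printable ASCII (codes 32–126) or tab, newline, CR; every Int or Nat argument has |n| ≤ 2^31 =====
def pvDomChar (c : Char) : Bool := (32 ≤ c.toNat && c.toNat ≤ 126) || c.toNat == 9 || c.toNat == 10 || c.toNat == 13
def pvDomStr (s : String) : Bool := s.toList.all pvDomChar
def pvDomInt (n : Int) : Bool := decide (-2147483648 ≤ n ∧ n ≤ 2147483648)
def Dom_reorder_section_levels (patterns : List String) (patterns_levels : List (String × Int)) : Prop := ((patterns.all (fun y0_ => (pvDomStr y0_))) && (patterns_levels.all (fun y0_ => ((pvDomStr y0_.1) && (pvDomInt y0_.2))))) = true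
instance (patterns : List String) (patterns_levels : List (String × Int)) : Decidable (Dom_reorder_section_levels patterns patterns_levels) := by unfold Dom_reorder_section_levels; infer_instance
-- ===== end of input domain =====

-- One honest line: B replaces A's presence dict + missing-before prefix-sum with a single
-- pass computing each name's section index, a set of the present indices, and a count of
-- present indices below each name's own as its level; both Pythons mutate the
-- patterns_levels dict in place the same way, the theorems are about the returned value.

-- ===== PORT A =====
def pvSectionsOrder : List String := ["title", "chapter", "article", "sub_article"]

def reorder_section_levels (patterns : List String) (patterns_levels : List (String × Int)) : List String × (List (String × Int)) :=
  -- present_sections = {prefix: any(name.startswith(prefix) for name in patterns) for prefix in sections_order}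
  let present_sections : PySem.Dict String Bool :=
    pvSectionsOrder.foldl
      (fun d pfx => d.insert pfx (patterns.any (fun name => PySem.Str.startswith name pfx)))
      PySem.Dict.empty
  -- missing_before loop (state = (missing_before, missing_count))
  let mb : PySem.Dict String Int × Int :=
    pvSectionsOrder.foldl
      (fun st pfx =>
        let d := st.1.insert pfx st.2
        if present_sections.getD pfx false then (d, st.2) else (d, st.2 + 1))
      (PySem.Dict.empty, 0)
  let missing_before := mb.1
  -- for name in patterns: ...
  let result : PySem.Dict String Int :=
    patterns.foldl
      (fun d name =>
        match pvSectionsOrder.find? (fun pfx => PySem.Str.startswith name pfx) with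
        | none => d  -- Python raises StopIteration here; excluded by Pre_
        | some section_type =>
          let original_position : Int := ((PySem.List.index? pvSectionsOrder section_type).getD 0 : Nat)
          let new_level := original_position - missing_before.getD section_type 0
          d.insert name new_level)
      (PySem.Dict.mk patterns_levels)
  (patterns, result.items)

-- ===== PORT B =====
-- indices[i] = next(j for j, prefix in enumerate(sections_order) if patterns[i].startswith(prefix))
-- (none = StopIteration; excluded by Pre_)
def pvFirstIdx (name : String) : Option Int :=
  ((PySem.List.enumerate pvSectionsOrder).find? (fun jp => PySem.Str.startswith name jp.2)).map (·.1)

def reorder_section_levels_alt (patterns : List String) (patterns_levels : List (String × Int)) : List String × (List (String × Int)) :=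
  let indices : List (Option Int) := patterns.map pvFirstIdx
  let present : PySem.Set (Option Int) := PySem.Set.ofList indices
  -- for name, j in zip(patterns, indices): patterns_levels[name] = sum(1 for k in present if k < j)
  let result : PySem.Dict String Int :=
    (patterns.zip indices).foldl
      (fun d nj =>
        match nj.2 with
        | none => d  -- Python raised StopIteration while building indices; excluded by Pre_
        | some j =>
          d.insert nj.1
            ((present.countP (fun k? => match k? with | some k => decide (k < j) | none => false) : Nat) : Int))
      (PySem.Dict.mk patterns_levels)
  (patterns, result.items)

-- ===== PRECONDITION & SPEC =====
-- Pre_: every pattern name starts with one of the four section prefixes; on any other name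
-- both Pythons raise StopIteration in next(...).
def Pre_reorder_section_levels (patterns : List String) (patterns_levels : List (String × Int)) : Prop :=
  ∀ name ∈ patterns, (pvSectionsOrder.any (fun pfx => PySem.Str.startswith name pfx)) = true
instance (patterns : List String) (patterns_levels : List (String × Int)) : Decidable (Pre_reorder_section_levels patterns patterns_levels) := by
  unfold Pre_reorder_section_levels; infer_instance
def pvWitness_reorder_section_levels : List String × (List (String × Int)) :=
  (["article 1", "title x", "sub_article"], [("title x", 3)])

def Spec_reorder_section_levels (patterns : List String) (patterns_levels : List (String × Int)) (out : List String × (List (String × Int))) : Prop := out = reorder_section_levels_alt patterns patterns_levels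
instance (patterns : List String) (patterns_levels : List (String × Int)) (out : List String × (List (String × Int))) : Decidable (Spec_reorder_section_levels patterns patterns_levels out) := by unfold Spec_reorder_section_levels; infer_instance

-- ===== CLAIM (what is proved, stated in full; the proofs are below) =====
def Claim_equal_reorder_section_levels : Prop := ∀ (patterns : List String) (patterns_levels : List (String × Int)), Dom_reorder_section_levels patterns patterns_levels → Pre_reorder_section_levels patterns patterns_levels → Spec_reorder_section_levels patterns patterns_levels (reorder_section_levels patterns patterns_levels)

-- ===== LEMMAS AND PROOFS =====

theorem pvHead (name p : String) (c : Char) (hc : p.toList.head? = some c)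
    (h : PySem.Str.startswith name p = true) : name.toList.head? = some c := by
  rw [PySem.Str.startswith_eq, PySem.Chars.startswith_iff] at h
  obtain ⟨t, ht⟩ := h
  cases hp : p.toList with
  | nil => simp [hp] at hc
  | cons a l => rw [hp] at hc ht; simp at hc; simp [← ht, hc]

-- the four prefixes pairwise differ in their first character, so at most one matches
theorem pvExcl (name p q : String) (cp cq : Char) (hcp : p.toList.head? = some cp)
    (hcq : q.toList.head? = some cq) (hne : cp ≠ cq)
    (hp : PySem.Str.startswith name p = true) (hq : PySem.Str.startswith name q = true) : False := by
  have h1 := pvHead name p cp hcp hp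
  have h2 := pvHead name q cq hcq hq
  rw [h1] at h2
  exact hne (Option.some.inj h2)

theorem pvFirstIdx_eq (name : String) : pvFirstIdx name =
    (if PySem.Str.startswith name "title" then some 0
     else if PySem.Str.startswith name "chapter" then some 1
     else if PySem.Str.startswith name "article" then some 2
     else if PySem.Str.startswith name "sub_article" then some 3
     else none) := by
  simp [pvFirstIdx, pvSectionsOrder, PySem.List.enumerate, List.find?]
  split_ifs <;> simp_all

theorem pvFirstIdx_some0 (name : String) :
    pvFirstIdx name = some 0 ↔ PySem.Str.startswith name "title" = true := by
  rw [pvFirstIdx_eq]; split_ifs <;> simp_all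
theorem pvFirstIdx_some1 (name : String) :
    pvFirstIdx name = some 1 ↔ PySem.Str.startswith name "chapter" = true := by
  rw [pvFirstIdx_eq]
  split_ifs with h0 h1 <;> simp_all
  exact Bool.eq_false_iff.mpr (fun h => pvExcl name "title" "chapter" 't' 'c' rfl rfl (by decide) h0 (by simpa using h))
theorem pvFirstIdx_some2 (name : String) :
    pvFirstIdx name = some 2 ↔ PySem.Str.startswith name "article" = true := by
  rw [pvFirstIdx_eq]
  split_ifs with h0 h1 h2 <;> simp_all
  · exact Bool.eq_false_iff.mpr (fun h => pvExcl name "title" "article" 't' 'a' rfl rfl (by decide) h0 (by simpa using h))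
  · exact Bool.eq_false_iff.mpr (fun h => pvExcl name "chapter" "article" 'c' 'a' rfl rfl (by decide) h1 (by simpa using h))
theorem pvFirstIdx_some3 (name : String) :
    pvFirstIdx name = some 3 ↔ PySem.Str.startswith name "sub_article" = true := by
  rw [pvFirstIdx_eq]
  split_ifs with h0 h1 h2 h3 <;> simp_all
  · exact Bool.eq_false_iff.mpr (fun h => pvExcl name "title" "sub_article" 't' 's' rfl rfl (by decide) h0 (by simpa using h))
  · exact Bool.eq_false_iff.mpr (fun h => pvExcl name "chapter" "sub_article" 'c' 's' rfl rfl (by decide) h1 (by simpa using h))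
  · exact Bool.eq_false_iff.mpr (fun h => pvExcl name "article" "sub_article" 'a' 's' rfl rfl (by decide) h2 (by simpa using h))

-- A's inner next(...): find? over the four prefixes, as an if-chain
theorem pvFindA (name : String) : pvSectionsOrder.find? (fun pfx => PySem.Str.startswith name pfx) =
    (if PySem.Str.startswith name "title" then some "title"
     else if PySem.Str.startswith name "chapter" then some "chapter"
     else if PySem.Str.startswith name "article" then some "article"
     else if PySem.Str.startswith name "sub_article" then some "sub_article"
     else none) := by
  simp [pvSectionsOrder, List.find?]
  split_ifs <;> simp_all

-- the present set is a permutation of the four candidates filtered by membership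
theorem pvPresentPerm (patterns : List String)
    (hPre : ∀ name ∈ patterns, (pvSectionsOrder.any (fun pfx => PySem.Str.startswith name pfx)) = true) :
    (PySem.Set.ofList (patterns.map pvFirstIdx)).Perm
      (([some 0, some 1, some 2, some 3] : List (Option Int)).filter
        (fun x => decide (x ∈ PySem.Set.ofList (patterns.map pvFirstIdx)))) := by
  apply (List.perm_ext_iff_of_nodup (PySem.Set.nodup_ofList _) (List.Nodup.filter _ (by decide))).mpr
  intro a
  simp only [List.mem_filter, decide_eq_true_eq]
  constructor
  · intro ha
    refine ⟨?_, ha⟩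
    have h2 := (PySem.Set.mem_ofList _ _).mp ha
    obtain ⟨n, hn, hfn⟩ := List.mem_map.mp h2
    have hany := hPre n hn
    rw [pvFirstIdx_eq] at hfn
    simp only [pvSectionsOrder, List.any_cons, List.any_nil] at hany
    split_ifs at hfn <;> simp_all
  · exact fun h => h.2

theorem pvMem0 (patterns : List String) :
    decide (some (0:Int) ∈ PySem.Set.ofList (patterns.map pvFirstIdx)) =
      patterns.any (fun n => PySem.Str.startswith n "title") := by
  cases h : patterns.any (fun n => PySem.Str.startswith n "title") with
  | false =>
    apply decide_eq_false
    intro hmem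
    rw [PySem.Set.mem_ofList] at hmem
    obtain ⟨n, hn, hfn⟩ := List.mem_map.mp hmem
    exact absurd ((pvFirstIdx_some0 n).mp hfn) (by simpa using (List.any_eq_false.mp h) n hn)
  | true =>
    apply decide_eq_true
    rw [PySem.Set.mem_ofList]
    obtain ⟨n, hn, hp⟩ := List.any_eq_true.mp h
    exact List.mem_map.mpr ⟨n, hn, (pvFirstIdx_some0 n).mpr hp⟩

theorem pvMem1 (patterns : List String) :
    decide (some (1:Int) ∈ PySem.Set.ofList (patterns.map pvFirstIdx)) =
      patterns.any (fun n => PySem.Str.startswith n "chapter") := by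
  cases h : patterns.any (fun n => PySem.Str.startswith n "chapter") with
  | false =>
    apply decide_eq_false
    intro hmem
    rw [PySem.Set.mem_ofList] at hmem
    obtain ⟨n, hn, hfn⟩ := List.mem_map.mp hmem
    exact absurd ((pvFirstIdx_some1 n).mp hfn) (by simpa using (List.any_eq_false.mp h) n hn)
  | true =>
    apply decide_eq_true
    rw [PySem.Set.mem_ofList]
    obtain ⟨n, hn, hp⟩ := List.any_eq_true.mp h
    exact List.mem_map.mpr ⟨n, hn, (pvFirstIdx_some1 n).mpr hp⟩

theorem pvMem2 (patterns : List String) :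
    decide (some (2:Int) ∈ PySem.Set.ofList (patterns.map pvFirstIdx)) =
      patterns.any (fun n => PySem.Str.startswith n "article") := by
  cases h : patterns.any (fun n => PySem.Str.startswith n "article") with
  | false =>
    apply decide_eq_false
    intro hmem
    rw [PySem.Set.mem_ofList] at hmem
    obtain ⟨n, hn, hfn⟩ := List.mem_map.mp hmem
    exact absurd ((pvFirstIdx_some2 n).mp hfn) (by simpa using (List.any_eq_false.mp h) n hn)
  | true =>
    apply decide_eq_true
    rw [PySem.Set.mem_ofList]
    obtain ⟨n, hn, hp⟩ := List.any_eq_true.mp h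
    exact List.mem_map.mpr ⟨n, hn, (pvFirstIdx_some2 n).mpr hp⟩

theorem pvMem3 (patterns : List String) :
    decide (some (3:Int) ∈ PySem.Set.ofList (patterns.map pvFirstIdx)) =
      patterns.any (fun n => PySem.Str.startswith n "sub_article") := by
  cases h : patterns.any (fun n => PySem.Str.startswith n "sub_article") with
  | false =>
    apply decide_eq_false
    intro hmem
    rw [PySem.Set.mem_ofList] at hmem
    obtain ⟨n, hn, hfn⟩ := List.mem_map.mp hmem
    exact absurd ((pvFirstIdx_some3 n).mp hfn) (by simpa using (List.any_eq_false.mp h) n hn)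
  | true =>
    apply decide_eq_true
    rw [PySem.Set.mem_ofList]
    obtain ⟨n, hn, hp⟩ := List.any_eq_true.mp h
    exact List.mem_map.mpr ⟨n, hn, (pvFirstIdx_some3 n).mpr hp⟩

theorem reorder_section_levels_spec : Claim_equal_reorder_section_levels := by
  intro patterns patterns_levels _ hPre
  unfold Spec_reorder_section_levels reorder_section_levels reorder_section_levels_alt
  have hzip : patterns.zip (patterns.map pvFirstIdx) = patterns.map (fun n => (n, pvFirstIdx n)) := by
    simpa using (List.zip_map' (f := id) (g := pvFirstIdx) (l := patterns))
  refine congrArg (Prod.mk patterns) (congrArg PySem.Dict.items ?_)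
  rw [hzip, List.foldl_map]
  apply PySem.List.foldl_congr_mem
  intro acc name hmem
  dsimp only
  rw [pvFindA, pvFirstIdx_eq]
  have hperm := pvPresentPerm patterns hPre
  cases hs0 : PySem.Str.startswith name "title" <;>
    cases hs1 : PySem.Str.startswith name "chapter" <;>
      cases hs2 : PySem.Str.startswith name "article" <;>
        cases hs3 : PySem.Str.startswith name "sub_article"
  all_goals first
    | rfl
    | (exfalso
       first
        | exact pvExcl name "title" "chapter" 't' 'c' rfl rfl (by decide) hs0 hs1
        | exact pvExcl name "title" "article" 't' 'a' rfl rfl (by decide) hs0 hs2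
        | exact pvExcl name "title" "sub_article" 't' 's' rfl rfl (by decide) hs0 hs3
        | exact pvExcl name "chapter" "article" 'c' 'a' rfl rfl (by decide) hs1 hs2
        | exact pvExcl name "chapter" "sub_article" 'c' 's' rfl rfl (by decide) hs1 hs3
        | exact pvExcl name "article" "sub_article" 'a' 's' rfl rfl (by decide) hs2 hs3)
    | (refine congrArg (fun v => PySem.Dict.insert acc name v) ?_
       rw [hperm.countP_eq]
       simp only [pvSectionsOrder, List.foldl, List.filter_cons, List.filter_nil,
         pvMem0, pvMem1, pvMem2, pvMem3]
       cases hb0 : patterns.any (fun n => PySem.Str.startswith n "title") <;>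
         cases hb1 : patterns.any (fun n => PySem.Str.startswith n "chapter") <;>
           cases hb2 : patterns.any (fun n => PySem.Str.startswith n "article") <;>
             cases hb3 : patterns.any (fun n => PySem.Str.startswith n "sub_article") <;>
               decide)
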